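-- pv_equiv track=rewrite | github.com/cigdemahmet27/principle_of_cmp_comm_p1 | src/encoders.py | encode_bipolar_ami
-- ===== SOURCE A (Python) =====
-- def encode_bipolar_ami(bits):
--     """
--     Bipolar-AMI:
--     0 -> Zero voltage
--     1 -> Alternating Positive and Negative
--     """
--     signal = []
--     last_one = -1
--     for bit in bits:
--         if bit == '0':
--             signal.extend([0, 0])
--         else:
--             last_one *= -1
--             signal.extend([last_one, last_one])
--     return signal
-- ===== SOURCE B (Python) =====
-- def encode_bipolar_ami(bits):
--     """
--     Bipolar-AMI via a prefix count of ones: first tabulate the cumulative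
--     number of non-'0' bits, then map each (bit, count) pair to its pulse.
--     """
--     ones = []
--     c = 0
--     for b in bits:
--         c += (b != '0')
--         ones.append(c)
--     return [v
--             for b, c in zip(bits, ones)
--             for v in ((0, 0) if b == '0' else ((1, 1) if c % 2 else (-1, -1)))]
-- ===== Notes on version B (the rewrite author's own statement) =====
-- stated objective: alternative
-- what changed: Replaces the stateful running-sign loop with a two-pass structure: a prefix table of cumulative one-counts, then a stateless comprehension mapping each (bit, count) pair to its pulse via the count's parity.
import Mathlib
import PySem

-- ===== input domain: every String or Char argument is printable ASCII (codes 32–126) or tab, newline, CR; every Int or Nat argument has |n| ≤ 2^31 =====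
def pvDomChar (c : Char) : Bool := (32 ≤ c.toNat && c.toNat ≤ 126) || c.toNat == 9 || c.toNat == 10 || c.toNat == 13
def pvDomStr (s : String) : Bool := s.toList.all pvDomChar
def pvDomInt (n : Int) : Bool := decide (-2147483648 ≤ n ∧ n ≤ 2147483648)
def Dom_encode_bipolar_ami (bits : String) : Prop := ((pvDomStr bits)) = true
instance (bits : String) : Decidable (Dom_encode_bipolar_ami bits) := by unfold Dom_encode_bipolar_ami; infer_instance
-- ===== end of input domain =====

-- B replaces A's stateful running-sign loop with a prefix-count table plus a
-- stateless map (objective: alternative decomposition, same cost).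


-- ===== PORT A =====
-- state: (signal, last_one); literal transliteration of A's for-loop
def encode_bipolar_ami (bits : String) : List Int :=
  (bits.toList.foldl
    (fun (st : List Int × Int) bit =>
      if bit = '0' then (st.1 ++ [0, 0], st.2)
      else (st.1 ++ [st.2 * -1, st.2 * -1], st.2 * -1))
    ([], -1)).1

-- ===== PORT B =====
-- prefix table of cumulative one-counts (Source B's first loop)
def amiOnes : List Char → Int → List Int
  | [], _ => []
  | b :: rest, c =>
    let c' := c + (if b ≠ '0' then 1 else 0)
    c' :: amiOnes rest c'

-- the comprehension body of Source B: the pulse pair for one (bit, count)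
def amiEmit (bc : Char × Int) : List Int :=
  if bc.1 = '0' then [0, 0] else if bc.2 % 2 ≠ 0 then [1, 1] else [-1, -1]

def encode_bipolar_ami_alt (bits : String) : List Int :=
  let ones := amiOnes bits.toList 0
  (bits.toList.zip ones).flatMap amiEmit

-- ===== PRECONDITION & SPEC =====
def Spec_encode_bipolar_ami (bits : String) (out : List Int) : Prop := out = encode_bipolar_ami_alt bits
instance (bits : String) (out : List Int) : Decidable (Spec_encode_bipolar_ami bits out) := by unfold Spec_encode_bipolar_ami; infer_instance

-- ===== CLAIM (what is proved, stated in full; the proofs are below) =====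
def Claim_equal_encode_bipolar_ami : Prop := ∀ (bits : String), Dom_encode_bipolar_ami bits → Spec_encode_bipolar_ami bits (encode_bipolar_ami bits)

-- ===== LEMMAS AND PROOFS =====

-- Loop invariant: A's running sign equals the parity-derived sign of B's count.
lemma ami_main (l : List Char) : ∀ (sig : List Int) (c : Int), 0 ≤ c →
    (l.foldl
      (fun (st : List Int × Int) bit =>
        if bit = '0' then (st.1 ++ [0, 0], st.2)
        else (st.1 ++ [st.2 * -1, st.2 * -1], st.2 * -1))
      (sig, if c % 2 = 0 then -1 else 1)).1
    = sig ++ (l.zip (amiOnes l c)).flatMap amiEmit := by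
  induction l with
  | nil => intro sig c _; simp [amiOnes]
  | cons b rest ih =>
    intro sig c hc
    by_cases hb : b = '0'
    · simp only [amiOnes, hb, List.foldl_cons, List.zip_cons_cons, List.flatMap_cons,
        ite_true, ite_not, add_zero]
      rw [ih (sig ++ [0, 0]) c hc]
      simp [amiEmit]
    · have hsign : (if c % 2 = 0 then (-1:Int) else 1) * -1
          = (if (c + 1) % 2 = 0 then -1 else 1) := by
        rcases Int.emod_two_eq_zero_or_one c with h | h <;>
          · have h1 : (c + 1) % 2 = (c % 2 + 1) % 2 := by omega
            simp [h, h1]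
      simp only [amiOnes, List.foldl_cons, List.zip_cons_cons, List.flatMap_cons,
        hb, ite_false, ite_not]
      rw [hsign, ih _ (c + 1) (by omega)]
      rcases Int.emod_two_eq_zero_or_one (c + 1) with h | h <;>
        simp [h, hb, amiEmit]

-- ===== VERDICT (by name: the statement is the Claim_ definition above) =====
theorem encode_bipolar_ami_spec : Claim_equal_encode_bipolar_ami := by
  intro bits _
  unfold Spec_encode_bipolar_ami encode_bipolar_ami encode_bipolar_ami_alt
  have h := ami_main bits.toList [] 0 le_rfl
  simpa using h
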